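-- pv_equiv track=rewrite | github.com/douglasbolis/PROG2 | manipula_textos/atividade_1/libplnbsi.py | corrente
-- ===== SOURCE A (Python) =====
-- def corrente(pTexto, ppos, strSep):
--
--     if (pTexto[ppos] in strSep):
--         return None
--     else:
--         i = ppos
--         while (i >= 0) and (pTexto[i] not in strSep):
--             i -= 1
--         #fim while
--         j = ppos
--         while (j < len(pTexto)) and (pTexto[j] not in strSep):
--             j += 1
--         #fim while
--         return pTexto[i+1:j]
-- ===== SOURCE B (Python) =====
-- def corrente(pTexto, ppos, strSep):
--     if pTexto[ppos] in strSep: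
--         return None
--     # one forward pass collecting the (start, end) spans of all separator-free tokens
--     spans = []
--     start = 0
--     for k in range(len(pTexto) + 1):
--         if k == len(pTexto) or pTexto[k] in strSep:
--             spans.append((start, k))
--             start = k + 1
--     for s, e in spans:
--         if s <= ppos < e:
--             return pTexto[s:e]
--     return None
-- ===== Notes on version B (the rewrite author's own statement) =====
-- stated objective: alternative
-- what changed: Replaces A's two outward while-scans from ppos by a single forward pass that collects all (start,end) token spans cut at separators/string end, then looks up the span containing ppos and slices it.
-- outside the precondition, e.g. on corrente('ab cd', -1, ' '): A returns 'ab', B returns None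
import Mathlib
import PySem

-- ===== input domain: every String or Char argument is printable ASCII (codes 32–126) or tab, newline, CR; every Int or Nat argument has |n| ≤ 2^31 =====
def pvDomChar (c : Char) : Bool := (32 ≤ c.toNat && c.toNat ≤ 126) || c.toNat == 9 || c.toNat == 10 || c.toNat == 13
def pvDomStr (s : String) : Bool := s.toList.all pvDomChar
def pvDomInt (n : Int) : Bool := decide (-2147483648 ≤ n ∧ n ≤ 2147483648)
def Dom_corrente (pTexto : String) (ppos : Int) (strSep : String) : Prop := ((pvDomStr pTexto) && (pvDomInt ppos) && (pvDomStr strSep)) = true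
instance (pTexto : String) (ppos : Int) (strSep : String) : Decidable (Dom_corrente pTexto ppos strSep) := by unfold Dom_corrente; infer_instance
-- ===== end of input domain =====

-- B replaces A's two outward while-scans by one forward pass collecting all token spans, then a span lookup (alternative decomposition, same result).


-- ===== PORT A =====
-- Python's `pTexto[i] in strSep` on the 1-char string pTexto[i]
def sepB (seps : List Char) (c : Char) : Bool := PySem.Chars.isIn [c] seps

-- `i = ppos; while (i >= 0) and (pTexto[i] not in strSep): i -= 1` — fuel ppos+1 covers every run that terminates (i only decreases)
def loopDown (cs seps : List Char) : Nat → Int → Int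
  | 0, i => i
  | fuel + 1, i =>
    if 0 ≤ i then
      match PySem.List.pyGet? cs i with
      | some c => if sepB seps c then i else loopDown cs seps fuel (i - 1)
      | none => i          -- IndexError: unreachable under Pre_ (i stays within [0, ppos])
    else i

-- `j = ppos; while (j < len(pTexto)) and (pTexto[j] not in strSep): j += 1`
def loopUp (cs seps : List Char) (n : Nat) : Nat → Int → Int
  | 0, j => j
  | fuel + 1, j =>
    if j < (n : Int) then
      match PySem.List.pyGet? cs j with
      | some c => if sepB seps c then j else loopUp cs seps n fuel (j + 1)
      | none => j          -- IndexError: unreachable under Pre_ (j stays within [ppos, len))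
    else j

def corrente (pTexto : String) (ppos : Int) (strSep : String) : Option String :=
  let cs := pTexto.toList
  let seps := strSep.toList
  match PySem.List.pyGet? cs ppos with
  | none => none           -- IndexError on pTexto[ppos]; excluded by Pre_
  | some c =>
    if sepB seps c then none
    else
      let i := loopDown cs seps (ppos.toNat + 1) ppos
      let j := loopUp cs seps cs.length (cs.length + 1) ppos
      some (String.ofList (PySem.List.slice cs (some (i + 1)) (some j)))

-- ===== PORT B =====
-- one step of `for k in range(len(pTexto)+1): if k == len or pTexto[k] in strSep: spans.append((start,k)); start = k+1`
def spanStep (cs seps : List Char) (st : Int × List (Int × Int)) (k : Int) : Int × List (Int × Int) :=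
  if k = (cs.length : Int) ∨ sepB seps (PySem.List.pyGetD cs k ' ') then
    (k + 1, st.2 ++ [(st.1, k)])
  else st

-- `for s, e in spans: if s <= ppos < e: return pTexto[s:e]`
def findSpan (ppos : Int) : List (Int × Int) → Option (Int × Int)
  | [] => none
  | (s, e) :: rest => if s ≤ ppos ∧ ppos < e then some (s, e) else findSpan ppos rest

def corrente_alt (pTexto : String) (ppos : Int) (strSep : String) : Option String :=
  let cs := pTexto.toList
  let seps := strSep.toList
  match PySem.List.pyGet? cs ppos with
  | none => none           -- IndexError on pTexto[ppos]; excluded by Pre_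
  | some c =>
    if sepB seps c then none
    else
      let spans := ((PySem.List.pyRange 0 ((cs.length : Int) + 1) 1).foldl (spanStep cs seps) (0, [])).2
      match findSpan ppos spans with
      | some (s, e) => some (String.ofList (PySem.List.slice cs (some s) (some e)))
      | none => none

-- ===== PRECONDITION & SPEC =====
-- Pre_ excludes out-of-range ppos (A raises IndexError) and negative in-range ppos at a non-separator
-- character, where A's value comes from mixing Python's wrapped guard index with unwrapped loop indices —
-- an accident of A's implementation no caller would specify; B returns None there.
def Pre_corrente (pTexto : String) (ppos : Int) (strSep : String) : Prop :=
  PySem.Raise.InRange pTexto.toList.length ppos ∧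
  (ppos < 0 → PySem.Chars.isIn [pTexto.toList.getD (pTexto.toList.length - ppos.natAbs) ' '] strSep.toList = true)
instance (pTexto : String) (ppos : Int) (strSep : String) : Decidable (Pre_corrente pTexto ppos strSep) := by unfold Pre_corrente; infer_instance

def pvWitness_corrente : String × Int × String := ("ola mundo", 1, " ")

def Spec_corrente (pTexto : String) (ppos : Int) (strSep : String) (out : Option String) : Prop := out = corrente_alt pTexto ppos strSep
instance (pTexto : String) (ppos : Int) (strSep : String) (out : Option String) : Decidable (Spec_corrente pTexto ppos strSep out) := by unfold Spec_corrente; infer_instance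

-- ===== CLAIM (what is proved, stated in full; the proofs are below) =====
def Claim_equal_corrente : Prop := ∀ (pTexto : String) (ppos : Int) (strSep : String), Dom_corrente pTexto ppos strSep → Pre_corrente pTexto ppos strSep → Spec_corrente pTexto ppos strSep (corrente pTexto ppos strSep)

-- ===== LEMMAS AND PROOFS =====

-- start of the token whose queried position is p (scan left to the previous separator)
def tokStart (cs seps : List Char) : Nat → Nat
  | 0 => 0
  | p + 1 => if sepB seps (cs.getD p ' ') then p + 1 else tokStart cs seps p

-- end of the token: first separator position ≥ k, or the length
def tokEnd (cs seps : List Char) (k : Nat) : Nat :=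
  if h : k < cs.length then
    (if sepB seps cs[k] then k else tokEnd cs seps (k + 1))
  else cs.length
termination_by cs.length - k
decreasing_by omega

-- the spans B's fold produces from state (start = s, position k)
def spanGen (cs seps : List Char) (s k : Nat) : List (Int × Int) :=
  if h : k < cs.length then
    (if sepB seps cs[k] then ((s : Int), (k : Int)) :: spanGen cs seps (k + 1) (k + 1)
     else spanGen cs seps s (k + 1))
  else [((s : Int), (cs.length : Int))]
termination_by cs.length - k
decreasing_by all_goals omega

theorem loopDown_eq (cs seps : List Char) : ∀ (p : Nat), p < cs.length →
    sepB seps (cs.getD p ' ') = false →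
    ∀ fuel, p < fuel → loopDown cs seps fuel (p : Int) = (tokStart cs seps p : Int) - 1 := by
  intro p
  induction p with
  | zero =>
    intro hp hns fuel hf
    match fuel, hf with
    | f + 1, _ =>
      have hg : PySem.List.pyGet? cs (0 : Int) = some cs[0] := by
        simpa using PySem.List.pyGet?_ofNat cs 0 hp
      have hns0 : sepB seps cs[0] = false := by
        rwa [List.getD_eq_getElem cs ' ' hp] at hns
      simp only [Nat.cast_zero, loopDown, hg, hns0]
      norm_num [tokStart]
      match f with
      | 0 => rfl
      | g + 1 => simp [loopDown]
  | succ q ih =>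
    intro hp hns fuel hf
    match fuel, hf with
    | f + 1, _ =>
      have hg : PySem.List.pyGet? cs ((q + 1 : Nat) : Int) = some cs[q + 1] :=
        PySem.List.pyGet?_ofNat cs (q+1) hp
      have hns' : sepB seps cs[q + 1] = false := by
        rwa [List.getD_eq_getElem cs ' ' hp] at hns
      simp only [loopDown, hg]
      norm_num [hns']
      have hql : q < cs.length := by omega
      by_cases hsq : sepB seps (cs.getD q ' ') = true
      · match f, (by omega : q < f) with
        | g + 1, _ =>
          have hgq : PySem.List.pyGet? cs ((q : Nat) : Int) = some cs[q] :=
            PySem.List.pyGet?_ofNat cs q hql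
          have : sepB seps cs[q] = true := by rwa [List.getD_eq_getElem cs ' ' hql] at hsq
          rw [List.getD_eq_getElem?_getD] at hsq
          simp only [loopDown, hgq]
          norm_num [this, tokStart, hsq]
          omega
      · have := ih hql (by simpa using hsq) f (by omega)
        rw [this]
        simp only [Bool.not_eq_true] at hsq
        rw [List.getD_eq_getElem?_getD] at hsq
        simp [tokStart, hsq]
        omega

theorem loopUp_eq (cs seps : List Char) :
    ∀ m k, cs.length - k = m → k ≤ cs.length → ∀ fuel, m < fuel →
      loopUp cs seps cs.length fuel (k : Int) = (tokEnd cs seps k : Int) := by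
  intro m
  induction m with
  | zero =>
    intro k hm hk fuel hf
    have hkl : k = cs.length := by omega
    match fuel, hf with
    | f + 1, _ =>
      subst hkl
      simp [loopUp, tokEnd]
  | succ m ih =>
    intro k hm hk fuel hf
    have hkl : k < cs.length := by omega
    match fuel, hf with
    | f + 1, _ =>
      have hg : PySem.List.pyGet? cs (k : Int) = some cs[k] :=
        PySem.List.pyGet?_ofNat cs k hkl
      have hlt : (k : Int) < (cs.length : Int) := by exact_mod_cast hkl
      simp only [loopUp, hg, hlt, if_pos]
      by_cases hs : sepB seps cs[k] = true
      · rw [tokEnd]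
        simp [hkl, hs]
      · simp only [Bool.not_eq_true] at hs
        rw [hs]
        simp only [if_false, Bool.false_eq_true]
        have : ((k : Int) + 1) = ((k + 1 : Nat) : Int) := by push_cast; ring
        rw [this, ih (k + 1) (by omega) (by omega) f (by omega)]
        conv_rhs => rw [tokEnd]
        simp [hkl, hs]

theorem fold_eq_spanGen (cs seps : List Char) :
    ∀ m k s acc, k + m = cs.length + 1 → k ≤ cs.length →
      List.foldl (spanStep cs seps) (((s : Nat) : Int), acc) ((List.range' k m).map (Nat.cast : Nat → Int))
        = (((cs.length : Int) + 1), acc ++ spanGen cs seps s k) := by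
  intro m
  induction m with
  | zero => intro k s acc h hle; omega
  | succ m ih =>
    intro k s acc h hle
    rw [List.range'_succ, List.map_cons, List.foldl_cons]
    by_cases hk : k < cs.length
    · have hgd : PySem.List.pyGetD cs (k : Int) ' ' = cs[k] := by
        simp [PySem.List.pyGetD_natCast, List.getElem?_eq_getElem hk]
      have hne : ((k : Int) ≠ (cs.length : Int)) := by exact_mod_cast Nat.ne_of_lt hk
      by_cases hs : sepB seps cs[k] = true
      · have : spanStep cs seps ((s : Int), acc) (k : Int) = ((k : Int) + 1, acc ++ [((s:Int), (k:Int))]) := by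
          simp [spanStep, hgd, hs, hne]
        rw [this]
        have hcast : ((k : Int) + 1) = ((k + 1 : Nat) : Int) := by push_cast; ring
        rw [hcast, ih (k + 1) (k + 1) _ (by omega) (by omega)]
        conv_rhs => rw [spanGen]
        simp [hk, hs]
      · simp only [Bool.not_eq_true] at hs
        have : spanStep cs seps ((s : Int), acc) (k : Int) = ((s : Int), acc) := by
          simp [spanStep, hgd, hs, hne]
        rw [this, ih (k + 1) s _ (by omega) (by omega)]
        conv_rhs => rw [spanGen]
        simp [hk, hs]
    · have hkl : k = cs.length := by omega
      have hm0 : m = 0 := by omega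
      subst hkl hm0
      have : spanStep cs seps ((s : Int), acc) ((cs.length : Nat) : Int)
          = (((cs.length : Int)) + 1, acc ++ [((s:Int), (cs.length:Int))]) := by
        simp [spanStep]
      rw [this]
      simp [spanGen]

theorem tokStart_eq (cs seps : List Char) :
    ∀ p s : Nat, s ≤ p →
      (s = 0 ∨ (0 < s ∧ sepB seps (cs.getD (s - 1) ' ') = true)) →
      (∀ t, s ≤ t → t ≤ p → sepB seps (cs.getD t ' ') = false) →
      tokStart cs seps p = s := by
  intro p
  induction p with
  | zero =>
    intro s hsp hb _
    have : s = 0 := by omega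
    subst this
    rfl
  | succ q ih =>
    intro s hsp hb hns
    by_cases hse : s = q + 1
    · subst hse
      rcases hb with h0 | ⟨hpos, hsep⟩
      · omega
      · simp only [tokStart]
        simp only [Nat.add_sub_cancel] at hsep
        rw [hsep]
        simp
    · have hsq : s ≤ q := by omega
      have hq : sepB seps (cs.getD q ' ') = false := hns q hsq (by omega)
      simp only [tokStart, hq]
      simp
      exact ih s hsq hb (fun t ht1 ht2 => hns t ht1 (by omega))

theorem tokEnd_eq (cs seps : List Char) :
    ∀ m p e : Nat, e - p = m → p ≤ e → e ≤ cs.length →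
      (∀ t, p ≤ t → t < e → sepB seps (cs.getD t ' ') = false) →
      (e = cs.length ∨ (e < cs.length ∧ sepB seps (cs.getD e ' ') = true)) →
      tokEnd cs seps p = e := by
  intro m
  induction m with
  | zero =>
    intro p e hm hpe hel hns hend
    have : p = e := by omega
    subst this
    rcases hend with h | ⟨hl, hsep⟩
    · subst h
      rw [tokEnd]
      simp
    · rw [tokEnd]
      rw [List.getD_eq_getElem cs ' ' hl] at hsep
      simp [hl, hsep]
  | succ m ih =>
    intro p e hm hpe hel hns hend
    have hpl : p < cs.length := by omega
    have hnp : sepB seps cs[p] = false := by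
      have := hns p le_rfl (by omega)
      rwa [List.getD_eq_getElem cs ' ' hpl] at this
    rw [tokEnd]
    simp [hpl, hnp]
    exact ih (p + 1) e (by omega) (by omega) hel (fun t ht1 ht2 => hns t (by omega) ht2) hend

theorem findSpan_spanGen (cs seps : List Char) (p : Nat) (hp : p < cs.length)
    (hnp : sepB seps (cs.getD p ' ') = false) :
    ∀ m k s, cs.length - k = m → k ≤ cs.length → s ≤ k → s ≤ p →
      (s = 0 ∨ (0 < s ∧ sepB seps (cs.getD (s - 1) ' ') = true)) →
      (∀ t, s ≤ t → t < k → sepB seps (cs.getD t ' ') = false) →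
      findSpan (p : Int) (spanGen cs seps s k)
        = some ((tokStart cs seps p : Int), (tokEnd cs seps p : Int)) := by
  intro m
  induction m with
  | zero =>
    intro k s hm hk hsk hsp hb hns
    have hkl : k = cs.length := by omega
    subst hkl
    rw [spanGen]
    rw [dif_neg (lt_irrefl cs.length)]
    have hcond : (s : Int) ≤ (p : Int) ∧ (p : Int) < (cs.length : Int) := by
      constructor <;> exact_mod_cast (by omega : _)
    rw [show findSpan (p : Int) [((s : Int), (cs.length : Int))]
        = if (s : Int) ≤ (p : Int) ∧ (p : Int) < (cs.length : Int)
          then some ((s : Int), (cs.length : Int)) else findSpan (p : Int) [] from rfl,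
      if_pos hcond]
    have h1 : tokStart cs seps p = s :=
      tokStart_eq cs seps p s hsp hb (fun t ht1 ht2 => hns t ht1 (by omega))
    have h2 : tokEnd cs seps p = cs.length :=
      tokEnd_eq cs seps (cs.length - p) p cs.length rfl (by omega) le_rfl
        (fun t ht1 ht2 => hns t (by omega) ht2) (Or.inl rfl)
    rw [h1, h2]
  | succ m ih =>
    intro k s hm hk hsk hsp hb hns
    have hkl : k < cs.length := by omega
    rw [spanGen]
    by_cases hs : sepB seps cs[k] = true
    · simp only [hkl, dif_pos, hs, if_pos]
      have hpk : p ≠ k := by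
        intro h; subst h
        rw [List.getD_eq_getElem cs ' ' hkl] at hnp
        simp [hs] at hnp
      by_cases hplt : p < k
      · have hcond : (s : Int) ≤ (p : Int) ∧ (p : Int) < (k : Int) := by
          constructor <;> exact_mod_cast (by omega : _)
        simp only [findSpan]
        rw [if_pos hcond]
        have h1 : tokStart cs seps p = s :=
          tokStart_eq cs seps p s hsp hb (fun t ht1 ht2 => hns t ht1 (by omega))
        have h2 : tokEnd cs seps p = k :=
          tokEnd_eq cs seps (k - p) p k rfl (by omega) (by omega)
            (fun t ht1 ht2 => hns t (by omega) (by omega))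
            (Or.inr ⟨hkl, by rwa [List.getD_eq_getElem cs ' ' hkl]⟩)
        rw [h1, h2]
      · have hkp : k < p := by omega
        have hcond : ¬ ((s : Int) ≤ (p : Int) ∧ (p : Int) < (k : Int)) := by
          intro ⟨_, h2⟩
          have : p < k := by exact_mod_cast h2
          omega
        simp only [findSpan]
        rw [if_neg hcond]
        exact ih (k + 1) (k + 1) (by omega) (by omega) le_rfl (by omega)
          (Or.inr ⟨by omega, by simpa using (by rwa [List.getD_eq_getElem cs ' ' hkl] : sepB seps (cs.getD k ' ') = true)⟩)
          (fun t ht1 ht2 => by omega)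
    · simp only [Bool.not_eq_true] at hs
      simp only [hkl, dif_pos, hs, Bool.false_eq_true, if_false]
      exact ih (k + 1) s (by omega) (by omega) (by omega) hsp hb
        (fun t ht1 ht2 => by
          by_cases htk : t = k
          · subst htk; rwa [List.getD_eq_getElem cs ' ' hkl]
          · exact hns t ht1 (by omega))

-- ===== VERDICT (by name: the statement is the Claim_ definition above) =====
theorem corrente_spec : Claim_equal_corrente := by
  intro pTexto ppos strSep _ hpre
  unfold Spec_corrente
  obtain ⟨hin, hneg⟩ := hpre
  obtain ⟨hlo, hhi⟩ : -(pTexto.toList.length : Int) ≤ ppos ∧ ppos < pTexto.toList.length := hin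
  cases hget : PySem.List.pyGet? pTexto.toList ppos with
  | none => simp [corrente, corrente_alt, hget]
  | some c =>
    by_cases hsep : sepB strSep.toList c = true
    · simp [corrente, corrente_alt, hget, hsep]
    · simp only [Bool.not_eq_true] at hsep
      -- ppos is nonnegative: Pre_ makes a negative in-range ppos point at a separator
      have hpos : 0 ≤ ppos := by
        by_contra hneg'
        push Not at hneg'
        have hk1 : 0 < ppos.natAbs := by omega
        have hk2 : ppos.natAbs ≤ pTexto.toList.length := by omega
        have hrw : ppos = -(ppos.natAbs : Int) := by omega
        have hidx : pTexto.toList.length - ppos.natAbs < pTexto.toList.length := by omega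
        have hg2 := PySem.List.pyGet?_neg_natCast (xs := pTexto.toList) (k := ppos.natAbs) hk1 hk2
        rw [hrw, hg2, List.getElem?_eq_getElem hidx] at hget
        have hc : pTexto.toList[pTexto.toList.length - ppos.natAbs] = c := by
          exact Option.some_injective _ hget
        have := hneg hneg'
        rw [List.getD_eq_getElem _ ' ' hidx, hc] at this
        rw [show sepB strSep.toList c = PySem.Chars.isIn [c] strSep.toList from rfl, this] at hsep
        simp at hsep
      have hpp : ppos = (ppos.toNat : Int) := (Int.toNat_of_nonneg hpos).symm
      have hplen : ppos.toNat < pTexto.toList.length := by omega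
      have hc : pTexto.toList[ppos.toNat] = c := by
        have := PySem.List.pyGet?_ofNat pTexto.toList ppos.toNat hplen
        rw [← hpp, hget] at this
        exact (Option.some_injective _ this).symm
      have hnsp : sepB strSep.toList (pTexto.toList.getD ppos.toNat ' ') = false := by
        rw [List.getD_eq_getElem _ ' ' hplen, hc]; exact hsep
      -- evaluate A
      simp only [corrente, corrente_alt, hget, hsep, Bool.false_eq_true, if_false]
      rw [hpp]
      simp only [Int.toNat_natCast]
      rw [loopDown_eq pTexto.toList strSep.toList ppos.toNat hplen hnsp (ppos.toNat + 1) (by omega),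
        loopUp_eq pTexto.toList strSep.toList (pTexto.toList.length - ppos.toNat) ppos.toNat rfl
          (by omega) (pTexto.toList.length + 1) (by omega)]
      -- evaluate B
      have hcast : ((pTexto.toList.length : Int) + 1) = ((pTexto.toList.length + 1 : Nat) : Int) := by
        push_cast; ring
      rw [hcast, PySem.List.pyRange_zero_natCast, List.range_eq_range']
      have hfold := fold_eq_spanGen pTexto.toList strSep.toList (pTexto.toList.length + 1) 0 0 []
        (by omega) (by omega)
      rw [Nat.cast_zero] at hfold
      rw [hfold]
      simp only [List.nil_append]
      rw [findSpan_spanGen pTexto.toList strSep.toList ppos.toNat hplen hnsp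
        pTexto.toList.length 0 0 (by omega) (by omega) (by omega) (by omega) (Or.inl rfl)
        (fun t ht1 ht2 => absurd ht2 (by omega))]
      have hone : ((tokStart pTexto.toList strSep.toList ppos.toNat : Int) - 1 + 1)
          = (tokStart pTexto.toList strSep.toList ppos.toNat : Int) := by ring
      rw [hone]
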